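-- pv_equiv track=rewrite | github.com/blankroad/agentic-dev-board | src/agentboard/tui/goal_tree.py | build_goal_tree
-- ===== SOURCE A (Python) =====
-- from typing import Iterable
--
-- _HIDDEN_STATUSES = frozenset({"pushed", "archived"})
--
-- def _sort_key(goal: dict) -> str:
--     """Sort by created_at if present, else fall back to the id's timestamp
--     prefix (ids are formatted g_YYYYMMDD_HHMMSS_XXXXXX, which is
--     lexicographically ordered)."""
--     ca = goal.get("created_at")
--     if isinstance(ca, str) and ca:
--         return ca
--     gid = goal.get("id", "")
--     return gid[2:] if gid.startswith("g_") else gid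
--
-- def build_goal_tree(
--     goals: Iterable[dict],
--     show_archived: bool,
-- ) -> list[tuple[dict, int]]:
--     goals = list(goals)
--
--     if show_archived:
--         visible = list(goals)
--     else:
--         visible = [g for g in goals if g.get("status") not in _HIDDEN_STATUSES]
--
--     visible_ids = {g["id"] for g in visible}
--
--     children_by_parent: dict[str | None, list[dict]] = {}
--     for g in visible:
--         pid = g.get("parent_id")
--         # Orphan-promote a child to root when: (a) no parent, (b) parent is
--         # hidden/missing, (c) parent_id equals the goal's own id (degenerate
--         # self-cycle). 2-cycles and longer cycles are handled by the
--         # visited guard in _walk.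
--         if pid is None or pid not in visible_ids or pid == g.get("id"):
--             children_by_parent.setdefault(None, []).append(g)
--         else:
--             children_by_parent.setdefault(pid, []).append(g)
--
--     for siblings in children_by_parent.values():
--         siblings.sort(key=_sort_key, reverse=True)
--
--     out: list[tuple[dict, int]] = []
--     visited: set[str] = set()
--
--     def _walk(parent_id: str | None, depth: int) -> None:
--         for g in children_by_parent.get(parent_id, []):
--             gid = g.get("id")
--             if gid in visited:
--                 # Cycle or duplicate-id: emit once, do not descend again.
--                 continue
--             visited.add(gid)
--             out.append((g, depth))
--             _walk(gid, depth + 1)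
--
--     _walk(None, 0)
--
--     # Any node not reached from root (n-cycle among visible nodes where no
--     # member was promoted) must still surface as root so the user can see
--     # and repair the damaged state.
--     for g in visible:
--         gid = g.get("id")
--         if gid not in visited:
--             visited.add(gid)
--             out.append((g, 0))
--
--     return out
-- ===== SOURCE B (Python) =====
-- def _sort_key(goal):
--     ca = goal.get("created_at")
--     if isinstance(ca, str) and ca:
--         return ca
--     gid = goal.get("id", "")
--     return gid[2:] if gid.startswith("g_") else gid
--
--
-- def build_goal_tree(goals, show_archived):
--     visible = [
--         g for g in goals
--         if show_archived
--         or (g.get("status") != "pushed" and g.get("status") != "archived")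
--     ]
--     ids = {g["id"] for g in visible}
--
--     def parent_key(g):
--         pid = g.get("parent_id")
--         if pid is None or pid not in ids or pid == g.get("id"):
--             return None
--         return pid
--
--     # no child index: each goal is tagged once with its (promoted) parent key
--     # and buckets are produced on demand by filtering the tagged list.
--     keyed = [(parent_key(g), g) for g in visible]
--
--     def bucket(key):
--         return sorted([g for k, g in keyed if k == key],
--                       key=_sort_key, reverse=True)
--
--     # purely functional pre-order walk: returns the emitted rows instead of
--     # appending to a shared accumulator.
--     def walk(key, depth, visited):
--         rows = []
--         for g in bucket(key):
--             gid = g.get("id")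
--             if gid not in visited:
--                 visited.add(gid)
--                 rows.append((g, depth))
--                 rows.extend(walk(gid, depth + 1, visited))
--         return rows
--
--     visited = set()
--     rows = walk(None, 0, visited)
--
--     leftovers = []
--     for g in visible:
--         gid = g.get("id")
--         if gid not in visited:
--             visited.add(gid)
--             leftovers.append((g, 0))
--     return rows + leftovers
-- ===== Notes on version B (the rewrite author's own statement) =====
-- stated objective: alternative
-- what changed: The precomputed children_by_parent dict and the accumulator-mutating recursive _walk are replaced by a tagged list (each visible goal paired once with its promoted parent key) whose buckets are produced on demand by filter+sort, traversed by a purely functional pre-order walk that returns its rows, with a separate returned leftovers list instead of appending to the shared out.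
import Mathlib
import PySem

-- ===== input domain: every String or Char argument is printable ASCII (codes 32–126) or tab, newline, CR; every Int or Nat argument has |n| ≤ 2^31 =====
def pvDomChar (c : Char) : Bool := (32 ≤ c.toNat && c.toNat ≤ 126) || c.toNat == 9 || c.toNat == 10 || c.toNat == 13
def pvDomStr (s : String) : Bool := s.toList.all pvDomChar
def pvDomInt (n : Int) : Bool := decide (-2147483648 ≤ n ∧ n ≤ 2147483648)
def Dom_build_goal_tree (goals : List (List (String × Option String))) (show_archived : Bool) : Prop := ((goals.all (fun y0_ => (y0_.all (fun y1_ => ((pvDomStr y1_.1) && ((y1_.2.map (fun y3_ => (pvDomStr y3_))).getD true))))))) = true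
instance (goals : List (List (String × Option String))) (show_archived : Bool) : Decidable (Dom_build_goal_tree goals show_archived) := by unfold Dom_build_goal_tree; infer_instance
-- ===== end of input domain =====

-- B replaces A's precomputed children_by_parent dict and accumulator-mutating recursive
-- _walk by a tagged (parent-key, goal) list with on-demand filter+sort buckets and a
-- purely functional walk that returns its rows (objective: alternative; no speed claim).

abbrev PvGoal := List (String × Option String)

-- g.get(k): first-match association-list lookup; Python returns None when the key is
-- absent, and the stored values are already Optional, so the two None's coincide.
-- (shared: both Pythons call g.get the same way)
def pvGet (g : PvGoal) (k : String) : Option String :=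
  ((PySem.Dict.mk g).get? k).getD none

-- _sort_key's fallback: gid = goal.get("id", ""); gid[2:] if gid.startswith("g_") else gid.
-- Under Pre_ every sorted goal's id is a string; the "" covers the .get default.
def pvSortFallback (g : PvGoal) : String :=
  let gid : String :=
    match (PySem.Dict.mk g).get? "id" with
    | some (some s) => s
    | _ => ""
  if PySem.Str.startswith gid "g_" then PySem.Str.slice gid (some 2) none else gid

-- _sort_key (identical helper in both Pythons)
def pvSortKey (g : PvGoal) : String :=
  match pvGet g "created_at" with
  | some s => if s.length ≠ 0 then s else pvSortFallback g
  | none => pvSortFallback g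

-- ===== PORT A =====
-- g.get("status") in _HIDDEN_STATUSES
def pvHidden (g : PvGoal) : Bool :=
  pvGet g "status" == some "pushed" || pvGet g "status" == some "archived"

-- the recursive _walk: iterate the bucket, skip visited, emit into the shared out,
-- recurse into children. fuel is only a totality guard (each descent adds a new id to
-- visited, and there are at most `len(visible)` distinct ids); the 0 branch is never
-- reached.
def pvWalkA (cb : PySem.Dict (Option String) (List PvGoal)) :
    Nat → List PvGoal → Int → PySem.Set (Option String) → List (PvGoal × Int) →
    PySem.Set (Option String) × List (PvGoal × Int)
  | _, [], _, visited, out => (visited, out)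
  | fuel, g :: gs, depth, visited, out =>
    let gid := pvGet g "id"
    if PySem.Set.contains visited gid then
      pvWalkA cb fuel gs depth visited out
    else
      match fuel with
      | 0 => (visited, out)
      | f + 1 =>
        let p := pvWalkA cb f (cb.getD gid []) (depth + 1)
          (PySem.Set.add visited gid) (out ++ [(g, depth)])
        pvWalkA cb (f + 1) gs depth p.1 p.2
termination_by fuel gs => (fuel, gs.length)

def build_goal_tree (goals : List (List (String × Option String))) (show_archived : Bool) : List ((List (String × Option String)) × Int) :=
  let visible := if show_archived then goals else goals.filter (fun g => !(pvHidden g))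
  let visible_ids : PySem.Set (Option String) :=
    PySem.Set.ofList (visible.map (fun g => pvGet g "id"))   -- {g["id"] for g in visible}
  let children : PySem.Dict (Option String) (List PvGoal) :=
    visible.foldl (fun d g =>
      let pid := pvGet g "parent_id"
      if pid == none || !(PySem.Set.contains visible_ids pid) || pid == pvGet g "id" then
        d.modify none [] (· ++ [g])        -- setdefault(None, []).append(g)
      else
        d.modify pid [] (· ++ [g])) PySem.Dict.empty
  -- for siblings in children_by_parent.values(): siblings.sort(key=_sort_key, reverse=True)
  let children := PySem.Dict.mk
    (children.items.map (fun kv => (kv.1, PySem.List.sorted kv.2 pvSortKey true)))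
  let fuel := visible.length + 1   -- totality guard only
  let p := pvWalkA children fuel (children.getD none []) 0 PySem.Set.empty []
  -- final pass: any visible node not reached from root surfaces at depth 0
  (visible.foldl (fun (st : PySem.Set (Option String) × List (PvGoal × Int)) g =>
      let gid := pvGet g "id"
      if PySem.Set.contains st.1 gid then st
      else (PySem.Set.add st.1 gid, st.2 ++ [(g, 0)])) p).2

-- ===== PORT B =====
-- parent_key(g): the goal's parent id, promoted to None for roots/orphans/self-cycles
def pvParentKey (ids : PySem.Set (Option String)) (g : PvGoal) : Option String :=
  let pid := pvGet g "parent_id"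
  if pid == none || !(PySem.Set.contains ids pid) || pid == pvGet g "id" then none
  else pid

-- bucket(key): on-demand filter of the tagged list, sorted
def pvBucket (keyed : List ((Option String) × PvGoal)) (k : Option String) : List PvGoal :=
  PySem.List.sorted ((keyed.filter (fun p => p.1 == k)).map (fun p => p.2)) pvSortKey true

-- walk: purely functional pre-order traversal returning its rows (the for-loop over
-- bucket(key) is the structural recursion over that list; visited threads through).
-- fuel is only a totality guard, as in port A.
def pvWalkC (keyed : List ((Option String) × PvGoal)) :
    Nat → List PvGoal → Int → PySem.Set (Option String) →
    PySem.Set (Option String) × List (PvGoal × Int)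
  | _, [], _, visited => (visited, [])
  | fuel, g :: gs, depth, visited =>
    let gid := pvGet g "id"
    if PySem.Set.contains visited gid then
      pvWalkC keyed fuel gs depth visited
    else
      match fuel with
      | 0 => (visited, [])
      | f + 1 =>
        let p := pvWalkC keyed f (pvBucket keyed gid) (depth + 1) (PySem.Set.add visited gid)
        let q := pvWalkC keyed (f + 1) gs depth p.1
        (q.1, (g, depth) :: (p.2 ++ q.2))
termination_by fuel gs => (fuel, gs.length)

-- the leftovers loop: unreached visible goals at depth 0, deduplicated by id
def pvLeftovers : List PvGoal → PySem.Set (Option String) → List (PvGoal × Int)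
  | [], _ => []
  | g :: gs, visited =>
    let gid := pvGet g "id"
    if PySem.Set.contains visited gid then pvLeftovers gs visited
    else (g, 0) :: pvLeftovers gs (PySem.Set.add visited gid)

def build_goal_tree_alt (goals : List (List (String × Option String))) (show_archived : Bool) : List ((List (String × Option String)) × Int) :=
  let visible := goals.filter (fun g =>
    show_archived || (pvGet g "status" != some "pushed" && pvGet g "status" != some "archived"))
  let ids : PySem.Set (Option String) :=
    PySem.Set.ofList (visible.map (fun g => pvGet g "id"))
  let keyed := visible.map (fun g => (pvParentKey ids g, g))
  let fuel := visible.length + 1   -- totality guard only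
  let p := pvWalkC keyed fuel (pvBucket keyed none) 0 PySem.Set.empty
  p.2 ++ pvLeftovers visible p.1

-- ===== PRECONDITION & SPEC =====
def pvHasStrId (g : PvGoal) : Bool :=
  match (PySem.Dict.mk g).get? "id" with
  | some (some _) => true
  | _ => false

-- Pre_ excludes inputs where some visible goal's "id" is missing or None: there A raises
-- KeyError (building visible_ids) or AttributeError (None id in the sibling-sort key),
-- except in the accidental corner where a non-empty created_at masks the None id.
def Pre_build_goal_tree (goals : List (List (String × Option String))) (show_archived : Bool) : Prop :=
  ∀ g ∈ goals, (show_archived = true ∨ pvHidden g = false) → pvHasStrId g = true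
instance (goals : List (List (String × Option String))) (show_archived : Bool) : Decidable (Pre_build_goal_tree goals show_archived) := by unfold Pre_build_goal_tree; infer_instance

def pvWitness_build_goal_tree : (List (List (String × Option String))) × Bool :=
  ([[("id", some "g_1"), ("parent_id", none)],
    [("id", some "g_2"), ("parent_id", some "g_1"), ("created_at", some "2024")]], false)

def Spec_build_goal_tree (goals : List (List (String × Option String))) (show_archived : Bool) (out : List ((List (String × Option String)) × Int)) : Prop := out = build_goal_tree_alt goals show_archived
instance (goals : List (List (String × Option String))) (show_archived : Bool) (out : List ((List (String × Option String)) × Int)) : Decidable (Spec_build_goal_tree goals show_archived out) := by unfold Spec_build_goal_tree; infer_instance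

-- ===== CLAIM (what is proved, stated in full; the proofs are below) =====
def Claim_equal_build_goal_tree : Prop := ∀ (goals : List (List (String × Option String))) (show_archived : Bool), Dom_build_goal_tree goals show_archived → Pre_build_goal_tree goals show_archived → Spec_build_goal_tree goals show_archived (build_goal_tree goals show_archived)

-- ===== LEMMAS AND PROOFS =====

-- both visible filters produce the same list
lemma pv_visible_eq (goals : List PvGoal) (sa : Bool) :
    (if sa = true then goals else goals.filter (fun g => !(pvHidden g))) =
      goals.filter (fun g =>
        sa || (pvGet g "status" != some "pushed" && pvGet g "status" != some "archived")) := by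
  cases sa
  · apply List.filter_congr
    intro g _
    simp [pvHidden, bne]
  · simp

-- the mapped-values dict looks up to the mapped value
lemma pvDict_mk_map_get? (f : List PvGoal → List PvGoal)
    (L : List ((Option String) × List PvGoal)) (k : Option String) :
    (PySem.Dict.mk (L.map (fun kv => (kv.1, f kv.2)))).get? k =
      ((PySem.Dict.mk L).get? k).map f := by
  induction L with
  | nil => rfl
  | cons kv L ih =>
    obtain ⟨a, b⟩ := kv
    by_cases h : (a == k) = true
    · simp [PySem.Dict.get?_mk_cons, h]
    · simp [PySem.Dict.get?_mk_cons, h, ih]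

lemma pvWalkA_nil (cb fuel d v o) : pvWalkA cb fuel [] d v o = (v, o) := by
  rw [pvWalkA.eq_def]

lemma pvWalkA_cons_vis (cb fuel g gs d v o) (h : pvGet g "id" ∈ v) :
    pvWalkA cb fuel (g :: gs) d v o = pvWalkA cb fuel gs d v o := by
  rw [pvWalkA.eq_def]; simp [h]

lemma pvWalkA_cons_zero (cb g gs d v o) (h : pvGet g "id" ∉ v) :
    pvWalkA cb 0 (g :: gs) d v o = (v, o) := by
  rw [pvWalkA.eq_def]; simp [h]

lemma pvWalkA_cons_new (cb f g gs d v o) (h : pvGet g "id" ∉ v) :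
    pvWalkA cb (f + 1) (g :: gs) d v o =
      (fun p => pvWalkA cb (f + 1) gs d p.1 p.2)
        (pvWalkA cb f (cb.getD (pvGet g "id") []) (d + 1)
          (PySem.Set.add v (pvGet g "id")) (o ++ [(g, d)])) := by
  rw [pvWalkA.eq_def]; simp [h]

lemma pvWalkC_nil (keyed fuel d v) : pvWalkC keyed fuel [] d v = (v, []) := by
  rw [pvWalkC.eq_def]

lemma pvWalkC_cons_vis (keyed fuel g gs d v) (h : pvGet g "id" ∈ v) :
    pvWalkC keyed fuel (g :: gs) d v = pvWalkC keyed fuel gs d v := by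
  rw [pvWalkC.eq_def]; simp [h]

lemma pvWalkC_cons_zero (keyed g gs d v) (h : pvGet g "id" ∉ v) :
    pvWalkC keyed 0 (g :: gs) d v = (v, []) := by
  rw [pvWalkC.eq_def]; simp [h]

lemma pvWalkC_cons_new (keyed f g gs d v) (h : pvGet g "id" ∉ v) :
    pvWalkC keyed (f + 1) (g :: gs) d v =
      (fun p => ((pvWalkC keyed (f + 1) gs d p.1).1,
          (g, d) :: (p.2 ++ (pvWalkC keyed (f + 1) gs d p.1).2)))
        (pvWalkC keyed f (pvBucket keyed (pvGet g "id")) (d + 1)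
          (PySem.Set.add v (pvGet g "id"))) := by
  rw [pvWalkC.eq_def]; simp [h]

-- the accumulator walk of A equals the row-returning walk of C, at the SAME fuel,
-- provided every dict bucket of A equals the on-demand bucket of B
lemma pvWalk_sim (cb : PySem.Dict (Option String) (List PvGoal))
    (keyed : List ((Option String) × PvGoal))
    (H : ∀ k, cb.getD k [] = pvBucket keyed k) :
    ∀ (f : Nat) (gs : List PvGoal) (d : Int) (v : PySem.Set (Option String))
      (o : List (PvGoal × Int)),
      pvWalkA cb f gs d v o =
        ((pvWalkC keyed f gs d v).1, o ++ (pvWalkC keyed f gs d v).2) := by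
  intro f
  induction f with
  | zero =>
    intro gs
    induction gs with
    | nil => intro d v o; rw [pvWalkA_nil, pvWalkC_nil]; simp
    | cons g gs ih =>
      intro d v o
      by_cases h : pvGet g "id" ∈ v
      · rw [pvWalkA_cons_vis cb _ _ _ _ _ _ h, pvWalkC_cons_vis keyed _ _ _ _ _ h]
        exact ih d v o
      · rw [pvWalkA_cons_zero cb _ _ _ _ _ h, pvWalkC_cons_zero keyed _ _ _ _ h]
        simp
  | succ f ihf =>
    intro gs
    induction gs with
    | nil => intro d v o; rw [pvWalkA_nil, pvWalkC_nil]; simp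
    | cons g gs ih =>
      intro d v o
      by_cases h : pvGet g "id" ∈ v
      · rw [pvWalkA_cons_vis cb _ _ _ _ _ _ h, pvWalkC_cons_vis keyed _ _ _ _ _ h]
        exact ih d v o
      · rw [pvWalkA_cons_new cb _ _ _ _ _ _ h, pvWalkC_cons_new keyed _ _ _ _ _ h]
        simp only [H]
        rw [ihf (pvBucket keyed (pvGet g "id")) (d + 1)
          (PySem.Set.add v (pvGet g "id")) (o ++ [(g, d)])]
        rw [ih d (pvWalkC keyed f (pvBucket keyed (pvGet g "id")) (d + 1)
          (PySem.Set.add v (pvGet g "id"))).1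
          ((o ++ [(g, d)]) ++ (pvWalkC keyed f (pvBucket keyed (pvGet g "id")) (d + 1)
            (PySem.Set.add v (pvGet g "id"))).2)]
        simp

-- A's final fold equals appending B's leftovers
lemma pv_leftovers_sim :
    ∀ (vis : List PvGoal) (v : PySem.Set (Option String)) (o : List (PvGoal × Int)),
      (vis.foldl (fun (st : PySem.Set (Option String) × List (PvGoal × Int)) g =>
          let gid := pvGet g "id"
          if PySem.Set.contains st.1 gid then st
          else (PySem.Set.add st.1 gid, st.2 ++ [(g, 0)])) (v, o)).2 =
        o ++ pvLeftovers vis v := by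
  intro vis
  induction vis with
  | nil => intro v o; simp [pvLeftovers]
  | cons g gs ih =>
    intro v o
    by_cases h : pvGet g "id" ∈ v
    · have hc : PySem.Set.contains v (pvGet g "id") = true := by simp [h]
      simp only [List.foldl_cons, hc, if_true]
      rw [ih]
      simp [pvLeftovers, h]
    · have hc : PySem.Set.contains v (pvGet g "id") = false := by simp [h]
      simp only [List.foldl_cons, hc, Bool.false_eq_true, if_false]
      rw [ih]
      simp [pvLeftovers, h]

-- ===== VERDICT (by name: the statement is the Claim_ definition above) =====
theorem build_goal_tree_spec : Claim_equal_build_goal_tree := by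
  unfold Claim_equal_build_goal_tree
  intro goals sa _hdom _hpre
  unfold Spec_build_goal_tree
  simp only [build_goal_tree, build_goal_tree_alt]
  rw [pv_visible_eq]
  generalize (goals.filter (fun g =>
      sa || (pvGet g "status" != some "pushed" && pvGet g "status" != some "archived"))) = vis
  generalize hids : PySem.Set.ofList (vis.map (fun g => pvGet g "id")) = ids
  -- A's fold step is B's tagging followed by a single modify
  have hstep :
      (fun (d : PySem.Dict (Option String) (List PvGoal)) (g : PvGoal) =>
        let pid := pvGet g "parent_id"
        if pid == none || !(PySem.Set.contains ids pid) || pid == pvGet g "id" then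
          d.modify none [] (· ++ [g])
        else
          d.modify pid [] (· ++ [g])) =
      (fun (d : PySem.Dict (Option String) (List PvGoal)) (g : PvGoal) =>
        d.modify (pvParentKey ids g) [] (· ++ [g])) := by
    funext d g
    by_cases hC : (pvGet g "parent_id" == none
        || !(PySem.Set.contains ids (pvGet g "parent_id"))
        || pvGet g "parent_id" == pvGet g "id") = true
    · simp only [if_true, pvParentKey, hC]
    · simp only [eq_false_of_ne_true hC, pvParentKey]
      simp
  rw [hstep]
  set keyed := vis.map (fun g => (pvParentKey ids g, g)) with hkeyed
  set d0 := vis.foldl (fun (d : PySem.Dict (Option String) (List PvGoal)) (g : PvGoal) =>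
      d.modify (pvParentKey ids g) [] (· ++ [g])) PySem.Dict.empty with hd0
  have hd0' : d0 = keyed.foldl (fun d p => d.modify p.1 [] (· ++ [p.2])) PySem.Dict.empty := by
    rw [hd0, hkeyed, List.foldl_map]
  have hfilter : ∀ k, d0.getD k [] = (keyed.filter (fun p => p.1 == k)).map (fun p => p.2) := by
    intro k
    rw [hd0', PySem.Dict.getD_foldl_modify_append]
    simp [PySem.Dict.getD_empty]
  set cb := PySem.Dict.mk (d0.items.map (fun kv => (kv.1, PySem.List.sorted kv.2 pvSortKey true)))
    with hcb
  have hbucket : ∀ k, cb.getD k [] = pvBucket keyed k := by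
    intro k
    have hmk : cb.get? k = (d0.get? k).map (fun v => PySem.List.sorted v pvSortKey true) := by
      rw [hcb]
      have := pvDict_mk_map_get? (fun v => PySem.List.sorted v pvSortKey true) d0.items k
      simpa using this
    cases hc : d0.get? k with
    | none =>
      have h1 : d0.getD k [] = [] := PySem.Dict.getD_of_get?_eq_none d0 [] hc
      have h2 : cb.getD k [] = [] := by
        rw [PySem.Dict.getD_eq_get?_getD, hmk, hc]; rfl
      rw [h2]
      unfold pvBucket
      rw [← hfilter k, h1]
      rfl
    | some w =>
      have h1 : d0.getD k [] = w := PySem.Dict.getD_of_get?_eq_some d0 [] hc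
      have h2 : cb.getD k [] = PySem.List.sorted w pvSortKey true := by
        rw [PySem.Dict.getD_eq_get?_getD, hmk, hc]; rfl
      rw [h2]
      unfold pvBucket
      rw [← hfilter k, h1]
  rw [hbucket none, pvWalk_sim cb keyed hbucket, pv_leftovers_sim]
  simp
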